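-- pv_equiv track=rewrite | github.com/AlexandreLaurac/MandelbroTkinter | test_traces_ensembles.py | trace_ensemble_ameliore
-- ===== SOURCE A (Python) =====
-- def trace_ensemble_ameliore(ensemble, largeur, hauteur):
--     # Simulation du tracé amelioré et idem
--     liste_pixels_traces = []
--     for py in range(hauteur):
--         px = 0
--         while px < largeur:
--             nb_points = 1
--             if ensemble[py][px] == True:
--                 while px+nb_points < largeur and ensemble[py][px+nb_points] == True:
--                     nb_points += 1
--                 # Ajout des pixels à la liste
--                 for p_x in range(px, px+nb_points):
--                     liste_pixels_traces.append((p_x, py))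
--                 nb_points += 1
--             px += nb_points
--     return liste_pixels_traces
-- ===== SOURCE B (Python) =====
-- def trace_ensemble_ameliore(ensemble, largeur, hauteur):
--     # Same traced-pixel list, by a plain per-cell row-major scan (no run grouping)
--     liste_pixels_traces = []
--     for py in range(hauteur):
--         for px in range(largeur):
--             if ensemble[py][px] == True:
--                 liste_pixels_traces.append((px, py))
--     return liste_pixels_traces
-- ===== Notes on version B (the rewrite author's own statement) =====
-- stated objective: simpler
-- what changed: Replaces A's run-length grouping scan (nb_points counter, inner while over runs, per-run append loop, skip-ahead index arithmetic) with a plain nested for-loop that appends each True cell directly in row-major order.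
import Mathlib
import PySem

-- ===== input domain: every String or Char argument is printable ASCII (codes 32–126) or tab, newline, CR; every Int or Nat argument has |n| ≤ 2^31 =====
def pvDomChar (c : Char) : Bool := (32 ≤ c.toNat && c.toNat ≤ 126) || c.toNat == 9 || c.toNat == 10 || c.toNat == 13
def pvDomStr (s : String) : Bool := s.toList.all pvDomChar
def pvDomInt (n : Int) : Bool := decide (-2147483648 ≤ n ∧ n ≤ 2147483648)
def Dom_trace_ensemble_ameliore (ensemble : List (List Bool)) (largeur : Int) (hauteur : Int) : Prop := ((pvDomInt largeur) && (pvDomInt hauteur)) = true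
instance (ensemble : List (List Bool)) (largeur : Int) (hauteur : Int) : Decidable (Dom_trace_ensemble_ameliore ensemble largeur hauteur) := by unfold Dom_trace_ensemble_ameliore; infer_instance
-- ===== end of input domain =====

-- B replaces A's run-length grouping scan with a plain per-cell nested loop; same output, simpler code.

-- ===== PORT A =====
-- ensemble[py][px] (indices are always ≥ 0 here; inside Pre_ they are in range, so getD false is exact)
def pvCell (e : List (List Bool)) (py px : Int) : Bool :=
  (PySem.List.pyGet? ((PySem.List.pyGet? e py).getD []) px).getD false

-- inner while: nb_points grows while the run of True continues
def pvRun (e : List (List Bool)) (py px largeur : Int) : Nat → Int → Int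
  | 0, nb => nb
  | f+1, nb =>
    if px + nb < largeur ∧ pvCell e py (px + nb) = true then
      pvRun e py px largeur f (nb + 1)
    else nb

-- outer while over px, fuel = largeur.toNat (px strictly increases each iteration)
def pvRowA (e : List (List Bool)) (py largeur : Int) : Nat → Int → List (Int × Int) → List (Int × Int)
  | 0, _, acc => acc
  | f+1, px, acc =>
    if px < largeur then
      if pvCell e py px = true then
        let nb := pvRun e py px largeur f 1
        pvRowA e py largeur f (px + nb + 1)
          (acc ++ (PySem.List.pyRange px (px + nb) 1).map (fun p_x => (p_x, py)))
      else pvRowA e py largeur f (px + 1) acc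
    else acc

def trace_ensemble_ameliore (ensemble : List (List Bool)) (largeur : Int) (hauteur : Int) : List (Int × Int) :=
  (PySem.List.pyRange 0 hauteur 1).foldl
    (fun acc py => pvRowA ensemble py largeur largeur.toNat 0 acc) []

-- ===== PORT B =====
def trace_ensemble_ameliore_alt (ensemble : List (List Bool)) (largeur : Int) (hauteur : Int) : List (Int × Int) :=
  (PySem.List.pyRange 0 hauteur 1).foldl
    (fun acc py =>
      (PySem.List.pyRange 0 largeur 1).foldl
        (fun acc2 px => if pvCell ensemble py px = true then acc2 ++ [(px, py)] else acc2) acc) []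

-- ===== PRECONDITION & SPEC =====
-- Pre_ excludes exactly the inputs where Python A raises IndexError: when largeur > 0, A reads
-- ensemble[py][px] for every py < hauteur and px < largeur, so those indices must exist.
def Pre_trace_ensemble_ameliore (ensemble : List (List Bool)) (largeur : Int) (hauteur : Int) : Prop :=
  0 < largeur → (hauteur ≤ (ensemble.length : Int) ∧
    ∀ row ∈ ensemble.take hauteur.toNat, largeur ≤ (row.length : Int))
instance (ensemble : List (List Bool)) (largeur : Int) (hauteur : Int) : Decidable (Pre_trace_ensemble_ameliore ensemble largeur hauteur) := by unfold Pre_trace_ensemble_ameliore; infer_instance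

def pvWitness_trace_ensemble_ameliore : List (List Bool) × Int × Int :=
  ([[true, false], [false, true]], 2, 2)

def Spec_trace_ensemble_ameliore (ensemble : List (List Bool)) (largeur : Int) (hauteur : Int) (out : List (Int × Int)) : Prop := out = trace_ensemble_ameliore_alt ensemble largeur hauteur
instance (ensemble : List (List Bool)) (largeur : Int) (hauteur : Int) (out : List (Int × Int)) : Decidable (Spec_trace_ensemble_ameliore ensemble largeur hauteur out) := by unfold Spec_trace_ensemble_ameliore; infer_instance

-- ===== CLAIM (what is proved, stated in full; the proofs are below) =====
def Claim_equal_trace_ensemble_ameliore : Prop := ∀ (ensemble : List (List Bool)) (largeur : Int) (hauteur : Int), Dom_trace_ensemble_ameliore ensemble largeur hauteur → Pre_trace_ensemble_ameliore ensemble largeur hauteur → Spec_trace_ensemble_ameliore ensemble largeur hauteur (trace_ensemble_ameliore ensemble largeur hauteur)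

-- ===== LEMMAS AND PROOFS =====

-- per-row reference scan, fuel-indexed on (largeur - px).toNat
def pvG (e : List (List Bool)) (py largeur : Int) : Nat → Int → List (Int × Int)
  | 0, _ => []
  | f+1, px =>
    if px < largeur then
      (if pvCell e py px = true then [(px, py)] else []) ++ pvG e py largeur f (px + 1)
    else []

theorem pvG_high (e : List (List Bool)) (py largeur : Int) (f : Nat) (px : Int)
    (h : largeur ≤ px) : pvG e py largeur f px = [] := by
  cases f with
  | zero => rfl
  | succ f => simp [pvG]; omega

theorem pvRun_ge (e : List (List Bool)) (py px largeur : Int) :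
    ∀ (f : Nat) (nb : Int), nb ≤ pvRun e py px largeur f nb := by
  intro f
  induction f with
  | zero => intro nb; simp [pvRun]
  | succ f ih =>
    intro nb
    simp only [pvRun]
    split
    · exact le_trans (by omega) (ih (nb + 1))
    · exact le_refl _

theorem pvRun_split (e : List (List Bool)) (py largeur px : Int) :
    ∀ (f : Nat) (nb : Int), (largeur - (px + nb)).toNat ≤ f →
    (PySem.List.pyRange (px + nb) (px + pvRun e py px largeur f nb) 1).map (fun p => (p, py))
      ++ pvG e py largeur ((largeur - (px + pvRun e py px largeur f nb + 1)).toNat)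
          (px + pvRun e py px largeur f nb + 1)
    = pvG e py largeur ((largeur - (px + nb)).toNat) (px + nb) := by
  intro f
  induction f with
  | zero =>
    intro nb hf
    have hge : largeur ≤ px + nb := by omega
    simp only [pvRun]
    rw [PySem.List.pyRange_one_eq_nil (le_refl _), pvG_high _ _ _ _ _ (by omega)]
    have : (largeur - (px + nb)).toNat = 0 := by omega
    rw [this]
    rfl
  | succ f ih =>
    intro nb hf
    simp only [pvRun]
    split
    · rename_i hc
      obtain ⟨hlt, hcell⟩ := hc
      have hr := pvRun_ge e py px largeur f (nb + 1)
      have hfu : (largeur - (px + (nb + 1))).toNat ≤ f := by omega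
      have hihm := ih (nb + 1) hfu
      have hFn : (largeur - (px + nb)).toNat = (largeur - (px + (nb + 1))).toNat + 1 := by omega
      rw [hFn]
      simp only [pvG, if_pos hlt, if_pos hcell]
      rw [PySem.List.pyRange_one_cons (by omega)]
      have hadd : px + nb + 1 = px + (nb + 1) := by ring
      simp only [List.map_cons, List.cons_append, hadd]
      rw [hihm]
      simp
    · rename_i hc
      rw [PySem.List.pyRange_one_eq_nil (le_refl _)]
      simp only [List.map_nil, List.nil_append]
      by_cases hlt : px + nb < largeur
      · have hcell : pvCell e py (px + nb) = false := by
          rcases Bool.eq_false_or_eq_true (pvCell e py (px + nb)) with h | h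
          · exact absurd ⟨hlt, h⟩ hc
          · exact h
        have hFn : (largeur - (px + nb)).toNat = (largeur - (px + nb + 1)).toNat + 1 := by omega
        rw [hFn]
        simp [pvG, hlt, hcell]
      · rw [pvG_high _ _ _ _ _ (by omega)]
        have : (largeur - (px + nb)).toNat = 0 := by omega
        rw [this]
        rfl

theorem pvRowA_eq (e : List (List Bool)) (py largeur : Int) :
    ∀ (f : Nat) (px : Int) (acc : List (Int × Int)), (largeur - px).toNat ≤ f →
    pvRowA e py largeur f px acc = acc ++ pvG e py largeur ((largeur - px).toNat) px := by
  intro f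
  induction f with
  | zero =>
    intro px acc hf
    have : (largeur - px).toNat = 0 := by omega
    rw [this]
    simp [pvRowA, pvG]
  | succ f ih =>
    intro px acc hf
    simp only [pvRowA]
    by_cases hlt : px < largeur
    · rw [if_pos hlt]
      by_cases hcell : pvCell e py px = true
      · rw [if_pos hcell]
        set nb := pvRun e py px largeur f 1 with hnb
        have hr : (1 : Int) ≤ nb := pvRun_ge e py px largeur f 1
        have hsplit := pvRun_split e py largeur px f 1 (by omega)
        rw [ih (px + nb + 1) _ (by omega)]
        have hFn : (largeur - px).toNat = (largeur - (px + 1)).toNat + 1 := by omega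
        rw [hFn]
        simp only [pvG, if_pos hlt, if_pos hcell]
        rw [PySem.List.pyRange_one_cons (by omega : px < px + nb)]
        rw [← hsplit]
        simp [hnb]
      · rw [if_neg hcell, ih (px + 1) acc (by omega)]
        have hFn : (largeur - px).toNat = (largeur - (px + 1)).toNat + 1 := by omega
        rw [hFn]
        simp [pvG, hlt, hcell]
    · rw [if_neg hlt, pvG_high _ _ _ _ _ (by omega)]
      simp

theorem pvRowB_eq (e : List (List Bool)) (py largeur : Int) :
    ∀ (n : Nat) (px : Int) (acc : List (Int × Int)), (largeur - px).toNat = n →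
    (PySem.List.pyRange px largeur 1).foldl
      (fun acc2 q => if pvCell e py q = true then acc2 ++ [(q, py)] else acc2) acc
    = acc ++ pvG e py largeur n px := by
  intro n
  induction n with
  | zero =>
    intro px acc hn
    rw [PySem.List.pyRange_one_eq_nil (by omega)]
    simp [pvG]
  | succ n ih =>
    intro px acc hn
    rw [PySem.List.pyRange_one_cons (by omega)]
    simp only [List.foldl_cons]
    rw [ih (px + 1) _ (by omega)]
    simp only [pvG, if_pos (show px < largeur by omega)]
    by_cases hcell : pvCell e py px = true <;> simp [hcell]

-- ===== VERDICT (by name: the statement is the Claim_ definition above) =====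
theorem trace_ensemble_ameliore_spec : Claim_equal_trace_ensemble_ameliore := by
  intro e largeur hauteur _hdom _hpre
  unfold Spec_trace_ensemble_ameliore trace_ensemble_ameliore trace_ensemble_ameliore_alt
  congr 1
  funext acc py
  rw [pvRowA_eq e py largeur largeur.toNat 0 acc (by omega),
      pvRowB_eq e py largeur (largeur - 0).toNat 0 acc rfl]
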